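-- pv_equiv track=rewrite | github.com/anthonyboisbouvier-paris/BindX_V2 | tools/pharmaco_db/ingest_uniprot_full.py | _extract_protein_family
-- ===== SOURCE A (Python) =====
-- from typing import Any, Dict, List, Optional, Tuple
--
-- def _extract_protein_family(keywords: List[Dict]) -> Optional[str]:
--     """Determine protein family from UniProt keywords."""
--     family_keywords = {
--         "Kinase": "Kinase",
--         "Tyrosine-protein kinase": "Kinase",
--         "Serine/threonine-protein kinase": "Kinase",
--         "Transferase": "Transferase",
--         "Hydrolase": "Hydrolase",
--         "Receptor": "Receptor",
--         "G-protein coupled receptor": "GPCR",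
--         "Ion channel": "Ion channel",
--         "Transporter": "Transporter",
--         "Protease": "Protease",
--         "Oxidoreductase": "Oxidoreductase",
--         "Ligase": "Ligase",
--         "Lyase": "Lyase",
--         "Isomerase": "Isomerase",
--         "Phosphatase": "Phosphatase",
--         "Metalloprotease": "Protease",
--         "Serine protease": "Protease",
--         "Cysteine protease": "Protease",
--         "Aspartyl protease": "Protease",
--         "Nuclear receptor": "Nuclear receptor",
--         "Transcription factor": "Transcription factor",
--         "Chaperone": "Chaperone",
--         "Deubiquitinase": "Deubiquitinase",
--         "Ubiquitin ligase": "Ubiquitin ligase",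
--     }
--
--     # Higher priority families first
--     priority = [
--         "GPCR", "Kinase", "Ion channel", "Nuclear receptor",
--         "Protease", "Phosphatase", "Transporter",
--         "Receptor", "Transferase", "Hydrolase", "Oxidoreductase",
--         "Ligase", "Lyase", "Isomerase",
--         "Transcription factor", "Chaperone",
--         "Deubiquitinase", "Ubiquitin ligase",
--     ]
--
--     kw_names = {kw.get("name") for kw in keywords if kw.get("name")}
--     matched_families = set()
--
--     for kw_name in kw_names:
--         if kw_name in family_keywords:
--             matched_families.add(family_keywords[kw_name])
--
--     if not matched_families:
--         return None
--
--     # Return highest priority match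
--     for fam in priority:
--         if fam in matched_families:
--             return fam
--
--     return matched_families.pop()
-- ===== SOURCE B (Python) =====
-- from typing import Dict, List, Optional
--
--
-- def _extract_protein_family(keywords: List[Dict]) -> Optional[str]:
--     """Determine protein family from UniProt keywords (single-pass best-rank scan)."""
--     family_keywords = {
--         "Kinase": "Kinase",
--         "Tyrosine-protein kinase": "Kinase",
--         "Serine/threonine-protein kinase": "Kinase",
--         "Transferase": "Transferase",
--         "Hydrolase": "Hydrolase",
--         "Receptor": "Receptor",
--         "G-protein coupled receptor": "GPCR",
--         "Ion channel": "Ion channel",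
--         "Transporter": "Transporter",
--         "Protease": "Protease",
--         "Oxidoreductase": "Oxidoreductase",
--         "Ligase": "Ligase",
--         "Lyase": "Lyase",
--         "Isomerase": "Isomerase",
--         "Phosphatase": "Phosphatase",
--         "Metalloprotease": "Protease",
--         "Serine protease": "Protease",
--         "Cysteine protease": "Protease",
--         "Aspartyl protease": "Protease",
--         "Nuclear receptor": "Nuclear receptor",
--         "Transcription factor": "Transcription factor",
--         "Chaperone": "Chaperone",
--         "Deubiquitinase": "Deubiquitinase",
--         "Ubiquitin ligase": "Ubiquitin ligase",
--     }
--
--     priority = [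
--         "GPCR", "Kinase", "Ion channel", "Nuclear receptor",
--         "Protease", "Phosphatase", "Transporter",
--         "Receptor", "Transferase", "Hydrolase", "Oxidoreductase",
--         "Ligase", "Lyase", "Isomerase",
--         "Transcription factor", "Chaperone",
--         "Deubiquitinase", "Ubiquitin ligase",
--     ]
--     rank = {fam: i for i, fam in enumerate(priority)}
--
--     best = None  # (rank, family) with the smallest rank seen so far
--     for kw in keywords:
--         name = kw.get("name")
--         if not name:
--             continue
--         fam = family_keywords.get(name)
--         if fam is None:
--             continue
--         r = rank.get(fam)
--         if r is None:
--             continue  # unreachable: every mapped family has a rank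
--         if best is None or r < best[0]:
--             best = (r, fam)
--
--     return best[1] if best is not None else None
-- ===== Notes on version B (the rewrite author's own statement) =====
-- stated objective: alternative
-- what changed: Replaced A's three-phase set machinery (build a set of keyword names, build a set of matched families, then scan the priority list for the first member) by a single pass over the keywords that keeps the (rank, family) pair with the smallest precomputed priority rank, returning that family or None.
import Mathlib
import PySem

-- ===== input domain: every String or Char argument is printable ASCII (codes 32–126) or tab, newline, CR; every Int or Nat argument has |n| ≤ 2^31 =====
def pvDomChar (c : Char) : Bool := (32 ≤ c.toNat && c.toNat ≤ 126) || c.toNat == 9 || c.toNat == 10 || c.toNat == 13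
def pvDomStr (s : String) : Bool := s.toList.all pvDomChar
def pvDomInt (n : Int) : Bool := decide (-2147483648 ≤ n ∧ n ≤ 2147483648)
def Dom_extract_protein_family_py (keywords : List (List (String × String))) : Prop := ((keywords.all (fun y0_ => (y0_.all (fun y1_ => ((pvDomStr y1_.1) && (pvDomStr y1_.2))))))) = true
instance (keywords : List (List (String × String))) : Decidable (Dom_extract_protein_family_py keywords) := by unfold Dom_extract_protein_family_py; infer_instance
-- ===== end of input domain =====

-- B replaces A's build-two-sets-then-scan-priority phases by one pass over the keywords keeping the smallest-rank match.

-- ===== PORT A =====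
-- family_keywords literal (shared by both Pythons)
def pvFamKW : PySem.Dict String String := PySem.Dict.mk [
  ("Kinase", "Kinase"),
  ("Tyrosine-protein kinase", "Kinase"),
  ("Serine/threonine-protein kinase", "Kinase"),
  ("Transferase", "Transferase"),
  ("Hydrolase", "Hydrolase"),
  ("Receptor", "Receptor"),
  ("G-protein coupled receptor", "GPCR"),
  ("Ion channel", "Ion channel"),
  ("Transporter", "Transporter"),
  ("Protease", "Protease"),
  ("Oxidoreductase", "Oxidoreductase"),
  ("Ligase", "Ligase"),
  ("Lyase", "Lyase"),
  ("Isomerase", "Isomerase"),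
  ("Phosphatase", "Phosphatase"),
  ("Metalloprotease", "Protease"),
  ("Serine protease", "Protease"),
  ("Cysteine protease", "Protease"),
  ("Aspartyl protease", "Protease"),
  ("Nuclear receptor", "Nuclear receptor"),
  ("Transcription factor", "Transcription factor"),
  ("Chaperone", "Chaperone"),
  ("Deubiquitinase", "Deubiquitinase"),
  ("Ubiquitin ligase", "Ubiquitin ligase")]

-- priority list literal (shared by both Pythons)
def pvPriority : List String := [
  "GPCR", "Kinase", "Ion channel", "Nuclear receptor",
  "Protease", "Phosphatase", "Transporter",
  "Receptor", "Transferase", "Hydrolase", "Oxidoreductase",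
  "Ligase", "Lyase", "Isomerase",
  "Transcription factor", "Chaperone",
  "Deubiquitinase", "Ubiquitin ligase"]

def extract_protein_family_py (keywords : List (List (String × String))) : Option String :=
  -- kw_names = {kw.get("name") for kw in keywords if kw.get("name")}
  let kw_names : PySem.Set String := PySem.Set.ofList (keywords.filterMap (fun kw =>
    match (PySem.Dict.mk kw).get? "name" with
    | some n => if n = "" then none else some n
    | none => none))
  -- for kw_name in kw_names: if in family_keywords: matched_families.add(...)
  -- (set iterated only to build another Set: order-independent)
  let matched : PySem.Set String := kw_names.foldl (fun m n =>
    match pvFamKW.get? n with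
    | some f => PySem.Set.add m f
    | none => m) PySem.Set.empty
  if matched = PySem.Set.empty then none
  else
    match pvPriority.find? (fun fam => PySem.Set.contains matched fam) with
    | some fam => some fam
    | none => matched.head?  -- matched_families.pop(); unreachable: every mapped family is in priority

-- ===== PORT B =====
-- rank = {fam: i for i, fam in enumerate(priority)}
def pvRankB : PySem.Dict String Int :=
  (PySem.List.enumerate pvPriority 0).foldl (fun d p => d.insert p.2 p.1) PySem.Dict.empty

-- one loop iteration of B: keep the (rank, family) pair with the smallest rank seen so far
def pvStepB (best : Option (Int × String)) (kw : List (String × String)) : Option (Int × String) :=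
  match (PySem.Dict.mk kw).get? "name" with
  | none => best
  | some n =>
    if n = "" then best
    else
      match pvFamKW.get? n with
      | none => best
      | some fam =>
        match pvRankB.get? fam with
        | none => best  -- unreachable: every mapped family has a rank
        | some r =>
          match best with
          | none => some (r, fam)
          | some (br, bf) => if r < br then some (r, fam) else some (br, bf)

def extract_protein_family_py_alt (keywords : List (List (String × String))) : Option String :=
  (keywords.foldl pvStepB none).map (fun p => p.2)

-- ===== PRECONDITION & SPEC =====
def Spec_extract_protein_family_py (keywords : List (List (String × String))) (out : Option String) : Prop := out = extract_protein_family_py_alt keywords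
instance (keywords : List (List (String × String))) (out : Option String) : Decidable (Spec_extract_protein_family_py keywords out) := by unfold Spec_extract_protein_family_py; infer_instance

-- ===== CLAIM (what is proved, stated in full; the proofs are below) =====
def Claim_equal_extract_protein_family_py : Prop := ∀ (keywords : List (List (String × String))), Dom_extract_protein_family_py keywords → Spec_extract_protein_family_py keywords (extract_protein_family_py keywords)

-- ===== LEMMAS AND PROOFS =====

-- the family a single keyword dict contributes (if any)
def pvCand (kw : List (String × String)) : Option String :=
  match (PySem.Dict.mk kw).get? "name" with
  | some n => if n = "" then none else pvFamKW.get? n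
  | none => none

-- "some keyword of l maps to family f"
def pvHits (l : List (List (String × String))) (f : String) : Bool :=
  l.any (fun kw => pvCand kw == some f)

-- the common normal form of both programs: first priority family hit, tagged with its rank
def pvBest (l : List (List (String × String))) : Option (Int × String) :=
  (pvPriority.find? (fun fam => pvHits l fam)).map (fun f => ((pvPriority.idxOf f : Int), f))

lemma pvFamKW_values_fact : ∀ f ∈ pvFamKW.values,
    f ∈ pvPriority ∧ pvRankB.get? f = some (pvPriority.idxOf f : Int) := by decide

lemma pvFam_fact {n f : String} (h : pvFamKW.get? n = some f) :
    f ∈ pvPriority ∧ pvRankB.get? f = some (pvPriority.idxOf f : Int) := by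
  apply pvFamKW_values_fact
  have h2 := PySem.Dict.mem_items_of_get?_eq_some pvFamKW h
  simp only [PySem.Dict.values, List.mem_map]
  exact ⟨(n, f), h2, rfl⟩

lemma pvCand_fact {kw : List (String × String)} {f : String} (h : pvCand kw = some f) :
    f ∈ pvPriority ∧ pvRankB.get? f = some (pvPriority.idxOf f : Int) := by
  unfold pvCand at h
  rcases hn : (PySem.Dict.mk kw).get? "name" with _ | n
  · simp [hn] at h
  · simp only [hn] at h
    by_cases he : n = ""
    · simp [he] at h
    · rw [if_neg he] at h
      exact pvFam_fact h

lemma pvHits_iff {l : List (List (String × String))} {f : String} :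
    pvHits l f = true ↔ ∃ kw ∈ l, pvCand kw = some f := by
  simp [pvHits]

-- membership in A's matched-families fold
lemma mem_matched_fold (l : List String) (m : List String) (f : String) :
    f ∈ l.foldl (fun m n =>
      match pvFamKW.get? n with
      | some g => PySem.Set.add m g
      | none => m) m ↔ f ∈ m ∨ ∃ n ∈ l, pvFamKW.get? n = some f := by
  induction l generalizing m with
  | nil => simp
  | cons n t ih =>
    rcases hg : pvFamKW.get? n with _ | g <;>
      (simp only [List.foldl_cons, hg, ih, PySem.Set.mem_add, List.exists_mem_cons_iff,
        Option.some.injEq, reduceCtorEq, false_or, eq_comm]; try tauto)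

-- A's matched set holds exactly the families some keyword maps to
lemma mem_matched_iff (keywords : List (List (String × String))) (f : String) :
    f ∈ (PySem.Set.ofList (keywords.filterMap (fun kw =>
          match (PySem.Dict.mk kw).get? "name" with
          | some n => if n = "" then none else some n
          | none => none))).foldl (fun m n =>
            match pvFamKW.get? n with
            | some g => PySem.Set.add m g
            | none => m) PySem.Set.empty
    ↔ pvHits keywords f = true := by
  rw [mem_matched_fold, pvHits_iff]
  simp only [PySem.Set.empty, List.not_mem_nil, false_or, PySem.Set.mem_ofList, List.mem_filterMap]
  constructor
  · rintro ⟨n, ⟨kw, hkw, hname⟩, hget⟩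
    refine ⟨kw, hkw, ?_⟩
    unfold pvCand
    rcases hn : (PySem.Dict.mk kw).get? "name" with _ | n'
    · simp [hn] at hname
    · simp only [hn] at hname ⊢
      by_cases he : n' = ""
      · simp [he] at hname
      · rw [if_neg he] at hname
        rw [if_neg he]
        injection hname with h; rw [h]; exact hget
  · rintro ⟨kw, hkw, hc⟩
    unfold pvCand at hc
    rcases hn : (PySem.Dict.mk kw).get? "name" with _ | n'
    · simp [hn] at hc
    · simp only [hn] at hc
      by_cases he : n' = ""
      · simp [he] at hc
      · rw [if_neg he] at hc
        exact ⟨n', ⟨kw, hkw, by simp only [hn]; rw [if_neg he]⟩, hc⟩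

-- A computes pvBest's family
lemma portA_eq_pvBest (keywords : List (List (String × String))) :
    extract_protein_family_py keywords = (pvBest keywords).map (fun p => p.2) := by
  unfold extract_protein_family_py pvBest
  set matched := (PySem.Set.ofList (keywords.filterMap (fun kw =>
          match (PySem.Dict.mk kw).get? "name" with
          | some n => if n = "" then none else some n
          | none => none))).foldl (fun m n =>
            match pvFamKW.get? n with
            | some g => PySem.Set.add m g
            | none => m) PySem.Set.empty with hm
  have hmem : ∀ f, f ∈ matched ↔ pvHits keywords f = true := fun f => by
    rw [hm]; exact mem_matched_iff keywords f
  have hcontains : (fun fam => PySem.Set.contains matched fam) = (fun fam => pvHits keywords fam) := by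
    funext fam
    rcases hb : pvHits keywords fam
    · simp only [PySem.Set.contains_eq_listContains]
      rw [Bool.eq_false_iff]
      intro hc
      have := (hmem fam).1 (by simpa using hc)
      rw [hb] at this; exact absurd this (by simp)
    · simp only [PySem.Set.contains_eq_listContains]
      simpa using (hmem fam).2 hb
  by_cases hempty : matched = PySem.Set.empty
  · rw [if_pos hempty]
    have hfind : pvPriority.find? (fun fam => pvHits keywords fam) = none := by
      rw [List.find?_eq_none]
      intro f _ hf
      have := (hmem f).2 hf
      rw [hempty] at this
      exact absurd this (by simp [PySem.Set.empty])
    rw [hfind]; rfl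
  · rw [if_neg hempty, hcontains]
    obtain ⟨f0, hf0⟩ := List.exists_mem_of_ne_nil matched (by simpa [PySem.Set.empty] using hempty)
    have hhit := (hmem f0).1 hf0
    obtain ⟨kw, _, hc⟩ := pvHits_iff.1 hhit
    have hfp := (pvCand_fact hc).1
    have hsome : (pvPriority.find? (fun fam => pvHits keywords fam)).isSome := by
      rw [List.find?_isSome]
      exact ⟨f0, hfp, hhit⟩
    rcases hfind : pvPriority.find? (fun fam => pvHits keywords fam) with _ | g
    · rw [hfind] at hsome; exact absurd hsome (by simp)
    · rfl

-- generic: first hit of (p or = f) is the index-minimum of first hit of p and f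
lemma find?_or_min (P : List String) (hnd : P.Nodup) (p : String → Bool) (f : String) (hf : f ∈ P) :
    P.find? (fun x => p x || (x == f)) = some (match P.find? p with
      | none => f
      | some g => if P.idxOf f < P.idxOf g then f else g) := by
  induction P with
  | nil => exact absurd hf (by simp)
  | cons x t ih =>
    rcases hpx : p x
    · by_cases hxf : x = f
      · subst hxf
        rw [List.find?_cons_of_pos (by simp)]
        rw [List.find?_cons_of_neg (by simp [hpx])]
        rcases hft : t.find? p with _ | g
        · rfl
        · have hgt : g ∈ t := List.mem_of_find?_eq_some hft
          have hgx : g ≠ x := fun h => (List.nodup_cons.1 hnd).1 (h ▸ hgt)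
          simp [List.idxOf_cons_self, List.idxOf_cons_ne t (fun h => hgx h.symm)]
      · have hft' : f ∈ t := by
          rcases List.mem_cons.1 hf with h | h
          · exact absurd h.symm hxf
          · exact h
        rw [List.find?_cons_of_neg (by simp [hpx, hxf])]
        rw [List.find?_cons_of_neg (by simp [hpx])]
        rw [ih (List.nodup_cons.1 hnd).2 hft']
        rcases hft : t.find? p with _ | g
        · rfl
        · have hgt : g ∈ t := List.mem_of_find?_eq_some hft
          have hgx : g ≠ x := fun h => (List.nodup_cons.1 hnd).1 (h ▸ hgt)
          simp only [List.idxOf_cons_ne t hxf,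
            List.idxOf_cons_ne t (fun h => hgx h.symm), Nat.succ_eq_add_one,
            Nat.add_lt_add_iff_right]
    · rw [List.find?_cons_of_pos (p := fun y => p y || (y == f)) (by simp [hpx]),
        List.find?_cons_of_pos hpx]
      simp [List.idxOf_cons_self]

lemma pvPriority_nodup : pvPriority.Nodup := by decide

-- one B step from the normal form
lemma step_pvBest (u : List (List (String × String))) (kw : List (String × String)) :
    pvStepB (pvBest u) kw = pvBest (u ++ [kw]) := by
  have hsplit : ∀ f, pvHits (u ++ [kw]) f = (pvHits u f || (pvCand kw == some f)) := by
    intro f; simp [pvHits, List.any_append]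
  rcases hc : pvCand kw with _ | f
  · have hsame : (fun fam => pvHits (u ++ [kw]) fam) = (fun fam => pvHits u fam) := by
      funext fam; rw [hsplit, hc]; simp
    have hB : pvBest (u ++ [kw]) = pvBest u := by unfold pvBest; rw [hsame]
    rw [hB]
    unfold pvCand at hc
    unfold pvStepB
    rcases hn : (PySem.Dict.mk kw).get? "name" with _ | n
    · rfl
    · simp only [hn] at hc ⊢
      by_cases he : n = ""
      · simp [he]
      · rw [if_neg he] at hc ⊢
        rw [hc]
  · obtain ⟨hfp, hrank⟩ := pvCand_fact hc
    have hsame : (fun fam => pvHits (u ++ [kw]) fam) = (fun x => pvHits u x || (x == f)) := by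
      funext x
      rw [hsplit, hc]
      congr 1
      rcases hxf : x == f
      · rw [Bool.eq_false_iff]
        intro hb
        have : f = x := by simpa using hb
        rw [this] at hxf; simp at hxf
      · have : x = f := by simpa using hxf
        rw [this]; simp
    have hor := find?_or_min pvPriority pvPriority_nodup (fun fam => pvHits u fam) f hfp
    have hstep : pvStepB (pvBest u) kw =
        (match pvBest u with
         | none => some ((pvPriority.idxOf f : Int), f)
         | some (br, bf) => if (pvPriority.idxOf f : Int) < br then some ((pvPriority.idxOf f : Int), f) else some (br, bf)) := by
      unfold pvStepB
      unfold pvCand at hc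
      rcases hn : (PySem.Dict.mk kw).get? "name" with _ | n
      · simp [hn] at hc
      · simp only [hn] at hc ⊢
        by_cases he : n = ""
        · simp [he] at hc
        · rw [if_neg he] at hc ⊢
          simp only [hc, hrank]
    rw [hstep]
    unfold pvBest
    rw [hsame, hor]
    rcases hfu : pvPriority.find? (fun fam => pvHits u fam) with _ | g
    · rfl
    · simp only [Option.map_some]
      have hcast : ((pvPriority.idxOf f : Int) < (pvPriority.idxOf g : Int)) ↔ pvPriority.idxOf f < pvPriority.idxOf g := by
        exact_mod_cast Iff.rfl
      by_cases hlt : pvPriority.idxOf f < pvPriority.idxOf g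
      · rw [if_pos hlt, if_pos (hcast.2 hlt)]
      · rw [if_neg hlt, if_neg (fun h => hlt (hcast.1 h))]

lemma foldl_pvBest (l u : List (List (String × String))) :
    l.foldl pvStepB (pvBest u) = pvBest (u ++ l) := by
  induction l generalizing u with
  | nil => simp
  | cons kw t ih =>
    rw [List.foldl_cons, step_pvBest, ih]
    simp

lemma pvBest_nil : pvBest [] = none := by decide

lemma portB_eq_pvBest (keywords : List (List (String × String))) :
    extract_protein_family_py_alt keywords = (pvBest keywords).map (fun p => p.2) := by
  unfold extract_protein_family_py_alt
  have h : keywords.foldl pvStepB none = pvBest keywords := by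
    have := foldl_pvBest keywords []
    rwa [pvBest_nil, List.nil_append] at this
  rw [h]

-- ===== VERDICT (by name: the statement is the Claim_ definition above) =====
theorem extract_protein_family_py_spec : Claim_equal_extract_protein_family_py := by
  intro keywords _
  unfold Spec_extract_protein_family_py
  rw [portA_eq_pvBest, portB_eq_pvBest]
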